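-- pv_equiv track=rewrite | github.com/sarahapplebaum/NewCaptionApp | OLD_FILES_TO_DELETE/test_runner.py | _extract_text_from_vtt
-- ===== SOURCE A (Python) =====
-- def _extract_text_from_vtt(vtt_content: str) -> str:
--     """Extract all text from VTT content"""
--     lines = vtt_content.split('\n')
--     text_parts = []
--
--     i = 0
--     while i < len(lines):
--         if '-->' in lines[i]:
--             i += 1
--             while i < len(lines) and lines[i].strip():
--                 text_parts.append(lines[i].strip())
--                 i += 1
--         else:
--             i += 1
--
--     return ' '.join(text_parts)
-- ===== SOURCE B (Python) =====
-- def _extract_text_from_vtt(vtt_content: str) -> str: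
--     """Extract all text from VTT content"""
--     # Stage 1: group the lines into cue blocks separated by blank lines.
--     blocks = []
--     cur = []
--     for line in vtt_content.split('\n'):
--         if line.strip():
--             cur.append(line)
--         elif cur:
--             blocks.append(cur)
--             cur = []
--     if cur:
--         blocks.append(cur)
--     # Stage 2: from each block, take the stripped lines after its first '-->' line.
--     parts = []
--     for block in blocks:
--         for j, line in enumerate(block):
--             if '-->' in line:
--                 parts.extend(s.strip() for s in block[j + 1:])
--                 break
--     return ' '.join(parts)
-- ===== Notes on version B (the rewrite author's own statement) =====
-- stated objective: alternative
-- what changed: A's single index scan with a nested inner while is replaced by two staged passes: first group the lines into cue blocks separated by blank lines, then take from each block the stripped lines after its first '-->' line.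
import Mathlib
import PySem

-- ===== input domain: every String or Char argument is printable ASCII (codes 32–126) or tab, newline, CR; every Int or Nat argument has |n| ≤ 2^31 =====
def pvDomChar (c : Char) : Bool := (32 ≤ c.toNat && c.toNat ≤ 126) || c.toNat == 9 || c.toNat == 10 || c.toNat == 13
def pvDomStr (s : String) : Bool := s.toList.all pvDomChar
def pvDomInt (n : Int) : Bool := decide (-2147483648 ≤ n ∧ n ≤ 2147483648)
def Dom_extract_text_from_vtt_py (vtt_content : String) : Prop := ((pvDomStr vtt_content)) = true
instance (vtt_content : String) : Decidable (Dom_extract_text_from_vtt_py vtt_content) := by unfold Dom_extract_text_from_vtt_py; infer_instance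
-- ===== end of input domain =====

-- B replaces A's nested index-based while-loop scan by two staged passes: first group the
-- lines into cue blocks separated by blank lines, then take from each block the stripped
-- lines after its first '-->' line (objective: alternative decomposition, same cost).

-- ===== PORT A =====
-- inner `while i < len(lines) and lines[i].strip():` — consumes nonblank lines,
-- returns (the stripped lines appended, the remaining lines)
def vttInnerA : List String → List String × List String
  | [] => ([], [])
  | l :: rest =>
    if PySem.Str.strip l ≠ "" then
      let pr := vttInnerA rest
      (PySem.Str.strip l :: pr.1, pr.2)
    else ([], l :: rest)

theorem vttInnerA_len (ls : List String) : (vttInnerA ls).2.length ≤ ls.length := by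
  induction ls with
  | nil => simp [vttInnerA]
  | cons l rest ih =>
    simp only [vttInnerA]
    split
    · simpa using Nat.le_succ_of_le ih
    · simp

-- outer `while i < len(lines):` walking the suffix of lines starting at i
def vttOuterA : List String → List String
  | [] => []
  | l :: rest =>
    if PySem.Str.isIn "-->" l then
      let pr := vttInnerA rest
      pr.1 ++ vttOuterA pr.2
    else vttOuterA rest
termination_by ls => ls.length
decreasing_by
  · have := vttInnerA_len rest; simp; omega
  · simp

def extract_text_from_vtt_py (vtt_content : String) : String :=
  -- lines = vtt_content.split('\n'); sep ≠ "" so split? is never none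
  PySem.Str.join " " (vttOuterA ((PySem.Str.split? vtt_content "\n").getD []))

-- ===== PORT B =====
-- stage-1 loop body: nonblank lines extend the current block, a blank line flushes it
def vttGroupStep (st : List (List String) × List String) (line : String) :
    List (List String) × List String :=
  if PySem.Str.strip line ≠ "" then (st.1, st.2 ++ [line])
  else if st.2 ≠ [] then (st.1 ++ [st.2], []) else st

-- stage-2 inner loop: `for j, line in enumerate(block): if '-->' in line: …; break`
def vttBlockText : List String → List String
  | [] => []
  | l :: rest => if PySem.Str.isIn "-->" l then rest.map PySem.Str.strip else vttBlockText rest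

def extract_text_from_vtt_py_alt (vtt_content : String) : String :=
  let st := ((PySem.Str.split? vtt_content "\n").getD []).foldl vttGroupStep ([], [])
  let blocks := if st.2 ≠ [] then st.1 ++ [st.2] else st.1
  PySem.Str.join " " (blocks.foldl (fun acc b => acc ++ vttBlockText b) [])

-- ===== PRECONDITION & SPEC =====
def Spec_extract_text_from_vtt_py (vtt_content : String) (out : String) : Prop := out = extract_text_from_vtt_py_alt vtt_content
instance (vtt_content : String) (out : String) : Decidable (Spec_extract_text_from_vtt_py vtt_content out) := by unfold Spec_extract_text_from_vtt_py; infer_instance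

-- ===== CLAIM =====
def Claim_equal_extract_text_from_vtt_py : Prop := ∀ (vtt_content : String), Dom_extract_text_from_vtt_py vtt_content → Spec_extract_text_from_vtt_py vtt_content (extract_text_from_vtt_py vtt_content)

-- ===== LEMMAS AND PROOFS =====

-- a line that strips to empty is all whitespace, so it cannot contain '-->'
theorem blank_no_arrow (l : String) (h : PySem.Str.strip l = "") :
    PySem.Str.isIn "-->" l = false := by
  rw [PySem.Str.isIn_eq, show ("-->" : String).toList = ['-', '-', '>'] from rfl]
  rw [PySem.Chars.isIn_eq_false_iff]
  intro hin
  have hmem : '-' ∈ l.toList := hin.mem (by simp)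
  have hE : PySem.Chars.strip l.toList = [] := by
    have := congrArg String.toList h
    rwa [PySem.Str.toList_strip] at this
  have hsp : ∀ c ∈ l.toList, PySem.Chars.isspace c = true := by
    unfold PySem.Chars.strip PySem.Chars.rstrip PySem.Chars.lstrip at hE
    rw [List.reverse_eq_nil_iff, List.dropWhile_eq_nil_iff] at hE
    have hall : ∀ x ∈ List.dropWhile PySem.Chars.isspace l.toList, PySem.Chars.isspace x = true := by
      intro x hx; exact hE x (List.mem_reverse.mpr hx)
    intro c hc
    rcases (by rw [List.takeWhile_append_dropWhile] ; exact hc :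
        c ∈ List.takeWhile PySem.Chars.isspace l.toList ++ List.dropWhile PySem.Chars.isspace l.toList)
      |> List.mem_append.mp with h1 | h2
    · exact List.mem_takeWhile_imp h1
    · exact hall c h2
  have := hsp '-' hmem
  simp [PySem.Chars.isspace] at this

-- proof-side views of the block structure
def vttHasArrow (xs : List String) : Bool := xs.any (fun l => PySem.Str.isIn "-->" l)

def vttTailAfter : List String → List String
  | [] => []
  | l :: r => if PySem.Str.isIn "-->" l then r else vttTailAfter r

theorem vtt_not_true {b : Bool} (h : b = false) : ¬ (b = true) := by
  intro hh; rw [h] at hh; exact Bool.false_ne_true hh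

theorem vttBlockText_eq (xs : List String) :
    vttBlockText xs = if vttHasArrow xs then (vttTailAfter xs).map PySem.Str.strip else [] := by
  induction xs with
  | nil => simp [vttBlockText, vttHasArrow]
  | cons l r ih =>
    by_cases ha : PySem.Str.isIn "-->" l = true
    · have ha' : PySem.Chars.isIn ['-', '-', '>'] l.toList = true := by simpa using ha
      simp [vttBlockText, vttHasArrow, vttTailAfter, ha']
    · have haf : PySem.Str.isIn "-->" l = false := by simpa using ha
      have h1 : vttBlockText (l :: r) = vttBlockText r := by
        simp only [vttBlockText]; rw [if_neg (vtt_not_true haf)]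
      have h2 : vttHasArrow (l :: r) = vttHasArrow r := by
        show (PySem.Str.isIn "-->" l || vttHasArrow r) = vttHasArrow r
        rw [haf, Bool.false_or]
      have h3 : vttTailAfter (l :: r) = vttTailAfter r := by
        simp only [vttTailAfter]; rw [if_neg (vtt_not_true haf)]
      rw [h1, h2, h3, ih]

theorem vttHasArrow_append_single (xs : List String) (l : String) :
    vttHasArrow (xs ++ [l]) = (vttHasArrow xs || PySem.Str.isIn "-->" l) := by
  simp [vttHasArrow]

theorem vttTailAfter_append_single_true (xs : List String) (l : String)
    (h : vttHasArrow xs = true) : vttTailAfter (xs ++ [l]) = vttTailAfter xs ++ [l] := by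
  induction xs with
  | nil => simp [vttHasArrow] at h
  | cons x r ih =>
    by_cases hx : PySem.Str.isIn "-->" x = true
    · simp only [List.cons_append, vttTailAfter, if_pos hx]
    · have hxf : PySem.Str.isIn "-->" x = false := by simpa using hx
      have hr : vttHasArrow r = true := by
        have : (PySem.Str.isIn "-->" x || vttHasArrow r) = true := h
        rwa [hxf, Bool.false_or] at this
      simp only [List.cons_append, vttTailAfter, if_neg hx]
      exact ih hr

theorem vttTailAfter_append_single_false (xs : List String) (l : String)
    (h : vttHasArrow xs = false) (hl : PySem.Str.isIn "-->" l = true) :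
    vttTailAfter (xs ++ [l]) = [] := by
  induction xs with
  | nil => simp only [List.nil_append, vttTailAfter, if_pos hl]
  | cons x r ih =>
    have hx : PySem.Str.isIn "-->" x = false := by
      have : (PySem.Str.isIn "-->" x || vttHasArrow r) = false := h
      exact (Bool.or_eq_false_iff.mp this).1
    have hr : vttHasArrow r = false := by
      have : (PySem.Str.isIn "-->" x || vttHasArrow r) = false := h
      exact (Bool.or_eq_false_iff.mp this).2
    simp only [List.cons_append, vttTailAfter]
    rw [if_neg (vtt_not_true hx)]
    exact ih hr

-- main invariant: the flushed grouping fold, flat-mapped through vttBlockText,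
-- equals A's two nested loops
theorem vtt_main (ls : List String) : ∀ (bs : List (List String)) (cur : List String),
    (if (ls.foldl vttGroupStep (bs, cur)).2 ≠ [] then
        (ls.foldl vttGroupStep (bs, cur)).1 ++ [(ls.foldl vttGroupStep (bs, cur)).2]
      else (ls.foldl vttGroupStep (bs, cur)).1).flatMap vttBlockText
      = bs.flatMap vttBlockText ++
        (if vttHasArrow cur = true
         then (vttTailAfter cur).map PySem.Str.strip ++ (vttInnerA ls).1 ++ vttOuterA (vttInnerA ls).2
         else vttOuterA ls) := by
  induction ls with
  | nil =>
    intro bs cur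
    by_cases hc : cur = []
    · subst hc; simp [vttHasArrow, vttOuterA]
    · simp only [List.foldl_nil, vttInnerA, vttOuterA, if_pos hc, List.flatMap_append]
      rw [show ([cur] : List (List String)).flatMap vttBlockText = vttBlockText cur by simp,
        vttBlockText_eq]
      by_cases ha : vttHasArrow cur = true <;> simp [ha]
  | cons l rest ih =>
    intro bs cur
    by_cases hb : PySem.Str.strip l ≠ ""
    · -- nonblank line: extend the current block
      have hstep : vttGroupStep (bs, cur) l = (bs, cur ++ [l]) := by
        simp only [vttGroupStep, if_pos hb]
      rw [List.foldl_cons, hstep, ih bs (cur ++ [l])]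
      by_cases ha : vttHasArrow cur = true
      · rw [if_pos (by rw [vttHasArrow_append_single, ha, Bool.true_or]),
          vttTailAfter_append_single_true cur l ha, if_pos ha]
        rw [show vttInnerA (l :: rest)
            = (PySem.Str.strip l :: (vttInnerA rest).1, (vttInnerA rest).2) by
          simp only [vttInnerA]; rw [if_pos hb]]
        simp
      · have haf : vttHasArrow cur = false := by simpa using ha
        by_cases hl : PySem.Str.isIn "-->" l = true
        · rw [if_pos (by rw [vttHasArrow_append_single, haf, hl, Bool.false_or]),
            vttTailAfter_append_single_false cur l haf hl, if_neg ha]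
          rw [show vttOuterA (l :: rest) = (vttInnerA rest).1 ++ vttOuterA (vttInnerA rest).2 by
            rw [vttOuterA, if_pos hl]]
          simp
        · have hlf : PySem.Str.isIn "-->" l = false := by simpa using hl
          rw [if_neg (vtt_not_true (by rw [vttHasArrow_append_single, haf, hlf, Bool.false_or])), if_neg ha]
          rw [show vttOuterA (l :: rest) = vttOuterA rest by rw [vttOuterA, if_neg hl]]
    · -- blank line: flush the current block (if any)
      rw [not_not] at hb
      have hl : PySem.Str.isIn "-->" l = false := blank_no_arrow l hb
      have houter : vttOuterA (l :: rest) = vttOuterA rest := by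
        rw [vttOuterA, if_neg (vtt_not_true hl)]
      have hinner : vttInnerA (l :: rest) = ([], l :: rest) := by
        simp only [vttInnerA]; rw [if_neg (by simp [hb])]
      by_cases hc : cur = []
      · subst hc
        have hstep : vttGroupStep (bs, ([] : List String)) l = (bs, []) := by
          simp [vttGroupStep, hb]
        rw [List.foldl_cons, hstep, ih bs []]
        simp [vttHasArrow, houter]
      · have hstep : vttGroupStep (bs, cur) l = (bs ++ [cur], []) := by
          simp [vttGroupStep, hb, hc]
        rw [List.foldl_cons, hstep, ih (bs ++ [cur]) [],
          show vttHasArrow ([] : List String) = false from rfl]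
        rw [hinner, houter, List.flatMap_append,
          show ([cur] : List (List String)).flatMap vttBlockText = vttBlockText cur by simp,
          vttBlockText_eq]
        by_cases ha : vttHasArrow cur = true
        · rw [if_pos ha, if_pos ha]; simp
        · simp only [if_neg ha]
          simp

-- ===== VERDICT (by name: the statement is the Claim_ definition above) =====
theorem extract_text_from_vtt_py_spec : Claim_equal_extract_text_from_vtt_py := by
  intro v _
  unfold Spec_extract_text_from_vtt_py extract_text_from_vtt_py extract_text_from_vtt_py_alt
  show PySem.Str.join " " (vttOuterA ((PySem.Str.split? v "\n").getD []))
      = PySem.Str.join " "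
          ((if (((PySem.Str.split? v "\n").getD []).foldl vttGroupStep ([], [])).2 ≠ [] then
              (((PySem.Str.split? v "\n").getD []).foldl vttGroupStep ([], [])).1 ++
                [(((PySem.Str.split? v "\n").getD []).foldl vttGroupStep ([], [])).2]
            else (((PySem.Str.split? v "\n").getD []).foldl vttGroupStep ([], [])).1).foldl
            (fun acc b => acc ++ vttBlockText b) [])
  rw [PySem.List.foldl_append_eq_flatMap vttBlockText,
    vtt_main ((PySem.Str.split? v "\n").getD []) [] []]
  simp [vttHasArrow]
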